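-- pv_equiv track=rewrite | github.com/WeiChihLin07/CP1404Practicals | ExamPrep/Functions/find_oldest_name.py | find_oldest_name
-- ===== SOURCE A (Python) =====
-- def find_oldest_name(names, ages):
--     if ages == []:
--         return None
--     index_of_oldest = 0
--     age_of_oldest = ages[0]
--     for i, age in enumerate(ages):
--         if age > age_of_oldest:
--             index_of_oldest = i
--             age_of_oldest = age
--     return names[index_of_oldest]
-- ===== SOURCE B (Python) =====
-- def find_oldest_name(names, ages):
--     if ages == []:
--         return None
--     return names[ages.index(max(ages))]
-- ===== Notes on version B (the rewrite author's own statement) =====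
-- stated objective: simpler
-- what changed: Replaces the manual enumerate-argmax loop (tracking index and best value) with two library passes: max(ages) then names[ages.index(...)], which matches A's first-occurrence tie-break.
import Mathlib
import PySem

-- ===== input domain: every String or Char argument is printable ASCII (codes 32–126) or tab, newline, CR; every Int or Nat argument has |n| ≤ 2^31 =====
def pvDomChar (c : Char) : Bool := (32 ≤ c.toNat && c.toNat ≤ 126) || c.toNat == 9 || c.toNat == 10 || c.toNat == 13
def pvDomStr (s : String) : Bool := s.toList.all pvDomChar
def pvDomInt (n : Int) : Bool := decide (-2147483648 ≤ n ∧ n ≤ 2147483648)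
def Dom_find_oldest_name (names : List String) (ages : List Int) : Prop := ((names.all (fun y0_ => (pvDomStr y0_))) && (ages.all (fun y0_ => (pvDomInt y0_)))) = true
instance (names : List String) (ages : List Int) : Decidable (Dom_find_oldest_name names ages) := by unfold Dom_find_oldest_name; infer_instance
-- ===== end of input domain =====

-- B replaces A's manual enumerate-argmax loop with two library passes (max, then first index of
-- that max), same O(n) cost; equivalence of the RETURN value on Pre_ (where Python A returns).

-- ===== PORT A =====
-- the loop body: if age > age_of_oldest: index_of_oldest, age_of_oldest = i, age
def pvStep (st : Int × Int) (p : Int × Int) : Int × Int :=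
  if p.2 > st.2 then p else st

def find_oldest_name (names : List String) (ages : List Int) : Option String :=
  match ages with
  | [] => none                                  -- if ages == []: return None
  | a0 :: _ =>
    -- index_of_oldest = 0; age_of_oldest = ages[0]; for i, age in enumerate(ages): …
    let st := (PySem.List.enumerate ages 0).foldl pvStep (0, a0)
    PySem.List.pyGet? names st.1                -- return names[index_of_oldest]

-- ===== PORT B =====
def find_oldest_name_alt (names : List String) (ages : List Int) : Option String :=
  if ages = [] then none
  else
    match PySem.List.max? ages (fun x => x) with
    | none => none                              -- unreachable: ages ≠ []
    | some m =>
      match PySem.List.index? ages m with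
      | none => none                            -- unreachable: m ∈ ages
      | some k => PySem.List.pyGet? names (k : Int)   -- return names[ages.index(max(ages))]

-- ===== PRECONDITION & SPEC =====
-- Pre_ excludes exactly the inputs where Python A raises IndexError: ages nonempty whose first
-- argmax position i is not a valid index into names (Python B raises there too).
def Pre_find_oldest_name (names : List String) (ages : List Int) : Prop :=
  ages = [] ∨ ∃ i, i < names.length ∧ i < ages.length ∧
    (∀ j, j < i → ages.getD j 0 < ages.getD i 0) ∧
    (∀ j, j < ages.length → ages.getD j 0 ≤ ages.getD i 0)
instance (names : List String) (ages : List Int) : Decidable (Pre_find_oldest_name names ages) :=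
  decidable_of_iff (ages = [] ∨ ∃ i, i < min names.length ages.length ∧
      (∀ j, j < i → ages.getD j 0 < ages.getD i 0) ∧
      (∀ j, j < ages.length → ages.getD j 0 ≤ ages.getD i 0)) (by
    unfold Pre_find_oldest_name
    constructor
    · rintro (h | ⟨i, h1, h⟩)
      · exact Or.inl h
      · exact Or.inr ⟨i, by omega, by omega, h⟩
    · rintro (h | ⟨i, h1, h2, h⟩)
      · exact Or.inl h
      · exact Or.inr ⟨i, by omega, h⟩)

def pvWitness_find_oldest_name : List String × List Int := (["alice", "bob"], [3, 7])

def Spec_find_oldest_name (names : List String) (ages : List Int) (out : Option String) : Prop := out = find_oldest_name_alt names ages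
instance (names : List String) (ages : List Int) (out : Option String) : Decidable (Spec_find_oldest_name names ages out) := by unfold Spec_find_oldest_name; infer_instance

-- ===== CLAIM (what is proved, stated in full; the proofs are below) =====
def Claim_equal_find_oldest_name : Prop := ∀ (names : List String) (ages : List Int), Dom_find_oldest_name names ages → Pre_find_oldest_name names ages → Spec_find_oldest_name names ages (find_oldest_name names ages)

-- ===== LEMMAS AND PROOFS =====

-- the loop never updates when every remaining element is ≤ the current best
theorem fold_of_all_le (l : List Int) (s bi bv : Int) (h : ∀ x ∈ l, x ≤ bv) :
    (PySem.List.enumerate l s).foldl pvStep (bi, bv) = (bi, bv) := by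
  induction l generalizing s with
  | nil => simp [PySem.List.enumerate_nil]
  | cons x t ih =>
    have hx : x ≤ bv := h x (by simp)
    rw [PySem.List.enumerate_cons, List.foldl_cons]
    have : pvStep (bi, bv) (s, x) = (bi, bv) := by
      simp [pvStep]; omega
    rw [this]
    exact ih (s + 1) (fun y hy => h y (by simp [hy]))

theorem foldl_max_of_all_le (l : List Int) (bv : Int) (h : ∀ x ∈ l, x ≤ bv) :
    l.foldl max bv = bv := by
  induction l generalizing bv with
  | nil => rfl
  | cons x t ih =>
    have hx : x ≤ bv := h x (by simp)
    simp only [List.foldl_cons]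
    rw [max_eq_left hx]
    exact ih bv (fun y hy => h y (by simp [hy]))

-- if some element beats the current best, the loop ends at the FIRST index of the running max
theorem fold_of_exists_gt (l : List Int) (s bi bv : Int) (h : ∃ x ∈ l, bv < x) :
    ∃ k : ℕ, PySem.List.index? l (l.foldl max bv) = some k ∧
      (PySem.List.enumerate l s).foldl pvStep (bi, bv) = (s + (k : Int), l.foldl max bv) := by
  induction l generalizing s bi bv with
  | nil => simp at h
  | cons x t ih =>
    rw [PySem.List.enumerate_cons, List.foldl_cons, List.foldl_cons]
    by_cases hx : bv < x
    · have hstep : pvStep (bi, bv) (s, x) = (s, x) := by simp [pvStep, hx]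
      rw [hstep, max_eq_right (le_of_lt hx)]
      by_cases hall : ∀ y ∈ t, y ≤ x
      · have hm : t.foldl max x = x := foldl_max_of_all_le t x hall
        rw [hm, fold_of_all_le t (s + 1) s x hall]
        exact ⟨0, by rw [PySem.List.index?_cons_self], by simp⟩
      · push Not at hall
        obtain ⟨y, hy, hxy⟩ := hall
        obtain ⟨k, hk, hfold⟩ := ih (s + 1) s x ⟨y, hy, hxy⟩
        have hM : x < t.foldl max x := by
          have := (PySem.List.le_foldl_max t x).2 y hy
          omega
        refine ⟨k + 1, ?_, ?_⟩
        · rw [PySem.List.index?_cons_of_ne _ (by omega), hk]; rfl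
        · rw [hfold]; congr 1; push_cast; ring
    · have hstep : pvStep (bi, bv) (s, x) = (bi, bv) := by
        simp [pvStep]; omega
      rw [hstep, max_eq_left (by omega)]
      obtain ⟨y, hy, hby⟩ := h
      have hyt : y ∈ t := by
        rcases List.mem_cons.mp hy with rfl | hyt
        · omega
        · exact hyt
      obtain ⟨k, hk, hfold⟩ := ih (s + 1) bi bv ⟨y, hyt, hby⟩
      have hM : bv < t.foldl max bv := by
        have := (PySem.List.le_foldl_max t bv).2 y hyt
        omega
      refine ⟨k + 1, ?_, ?_⟩
      · rw [PySem.List.index?_cons_of_ne _ (by omega), hk]; rfl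
      · rw [hfold]; congr 1; push_cast; ring

theorem ports_agree (names : List String) (ages : List Int) :
    find_oldest_name names ages = find_oldest_name_alt names ages := by
  match ages with
  | [] => rfl
  | a0 :: t =>
    unfold find_oldest_name find_oldest_name_alt
    rw [if_neg (by simp), PySem.List.max?_id_cons]
    simp only
    by_cases hall : ∀ y ∈ t, y ≤ a0
    · have hm : t.foldl max a0 = a0 := foldl_max_of_all_le t a0 hall
      rw [hm, PySem.List.index?_cons_self]
      have hall' : ∀ x ∈ a0 :: t, x ≤ a0 := by
        intro x hx
        rcases List.mem_cons.mp hx with rfl | h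
        · exact le_refl _
        · exact hall x h
      rw [fold_of_all_le (a0 :: t) 0 0 a0 hall']
      rfl
    · push Not at hall
      obtain ⟨y, hy, hxy⟩ := hall
      obtain ⟨k, hk, hfold⟩ :=
        fold_of_exists_gt (a0 :: t) 0 0 a0 ⟨y, by simp [hy], hxy⟩
      have hM : (a0 :: t).foldl max a0 = t.foldl max a0 := by
        simp [List.foldl_cons]
      rw [hM] at hk hfold
      rw [hk, hfold]
      simp

theorem find_oldest_name_spec : Claim_equal_find_oldest_name := by
  intro names ages _ _
  unfold Spec_find_oldest_name
  exact ports_agree names ages
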